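-- pv_equiv track=rewrite | github.com/bimdev1/DAL | dal/expander_v2.py | split_prompt
-- ===== SOURCE A (Python) =====
-- from typing import List, Optional, Dict, Any
--
-- def split_prompt(prompt: str, max_segments: int) -> List[str]:
--     """
--     Split the input prompt into up to max_segments segments of roughly
--     equal word length. Splitting occurs at word boundaries to avoid cutting
--     phrases in half. If fewer words are present than segments, the original
--     prompt is returned as a single segment.
--     """
--     words = prompt.split()
--     if max_segments <= 1 or len(words) <= 1:
--         return [prompt]
--
--     segment_length = max(1, len(words) // max_segments)
--     segments = []
--     for i in range(0, len(words), segment_length):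
--         segments.append(" ".join(words[i : i + segment_length]))
--         if len(segments) == max_segments - 1:
--             remainder = " ".join(words[i + segment_length :])
--             if remainder:
--                 segments[-1] = " ".join([segments[-1], remainder])
--             break
--     return segments
-- ===== SOURCE B (Python) =====
-- def split_prompt(prompt: str, max_segments: int):
--     """Single streaming pass over the words with an accumulator: group words
--     one at a time, flushing a full group while fewer than max_segments-2
--     groups have been emitted; the final accumulator becomes the last segment.
--     No index arithmetic, no slicing, no chunk counting."""
--     words = prompt.split()
--     if max_segments <= 1 or len(words) <= 1:
--         return [prompt]
--     seg_len = max(1, len(words) // max_segments)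
--     segments = []
--     cur = []
--     for w in words:
--         cur.append(w)
--         if len(cur) == seg_len and len(segments) < max_segments - 2:
--             segments.append(" ".join(cur))
--             cur = []
--     if cur:
--         segments.append(" ".join(cur))
--     return segments
-- ===== Notes on version B (the rewrite author's own statement) =====
-- stated objective: alternative
-- what changed: Replaces A's index loop over range(0,len,seg_len) with slicing, a break and a remainder merge by a single streaming pass over the words themselves: an accumulator collects words one at a time, a full group is flushed while fewer than max_segments-2 segments exist, and the final accumulator becomes the last segment; no slicing or index arithmetic remains.
import Mathlib
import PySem

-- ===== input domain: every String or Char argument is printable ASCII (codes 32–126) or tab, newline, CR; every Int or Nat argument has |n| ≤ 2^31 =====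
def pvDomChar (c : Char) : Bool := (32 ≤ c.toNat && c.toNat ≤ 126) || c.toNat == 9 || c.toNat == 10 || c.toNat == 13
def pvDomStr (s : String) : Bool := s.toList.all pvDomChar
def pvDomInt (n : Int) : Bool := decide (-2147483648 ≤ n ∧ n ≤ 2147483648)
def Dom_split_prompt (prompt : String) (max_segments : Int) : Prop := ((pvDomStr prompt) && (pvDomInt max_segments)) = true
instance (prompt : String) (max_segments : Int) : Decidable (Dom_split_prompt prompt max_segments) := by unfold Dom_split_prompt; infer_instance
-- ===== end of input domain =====

-- B replaces A's index/slice loop with a single streaming accumulator pass over the words (same cost; structural alternative).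


-- ===== PORT A =====
-- the for-loop over range(0, len(words), segment_length) with the break-and-merge at max_segments-1
def splitLoopA (words : List String) (L m : Int) : List Int → List String → List String
  | [], segs => segs
  | i :: rest, segs =>
    let seg := PySem.Str.join " " (PySem.List.slice words (some i) (some (i + L)))
    let segs' := segs ++ [seg]
    if (segs'.length : Int) = m - 1 then
      let remainder := PySem.Str.join " " (PySem.List.slice words (some (i + L)) none)
      if remainder ≠ "" then segs ++ [PySem.Str.join " " [seg, remainder]] else segs'
    else splitLoopA words L m rest segs'

def split_prompt (prompt : String) (max_segments : Int) : List String :=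
  let words := PySem.Str.split₀ prompt
  if max_segments ≤ 1 ∨ (words.length : Int) ≤ 1 then [prompt]
  else
    let L := max 1 (PySem.Int.floordiv (words.length : Int) max_segments)
    splitLoopA words L max_segments (PySem.List.pyRange 0 (words.length : Int) L) []

-- ===== PORT B =====
-- streaming pass: 'for w in words' with accumulator cur, flushing full groups while segments < max_segments-2
def splitLoopB (L m : Int) : List String → List String → List String → List String
  | [], segs, cur => if cur ≠ [] then segs ++ [PySem.Str.join " " cur] else segs
  | w :: rest, segs, cur =>
    let cur' := cur ++ [w]
    if ((cur'.length : Int) = L ∧ (segs.length : Int) < m - 2) then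
      splitLoopB L m rest (segs ++ [PySem.Str.join " " cur']) []
    else splitLoopB L m rest segs cur'

def split_prompt_alt (prompt : String) (max_segments : Int) : List String :=
  let words := PySem.Str.split₀ prompt
  if max_segments ≤ 1 ∨ (words.length : Int) ≤ 1 then [prompt]
  else
    let L := max 1 (PySem.Int.floordiv (words.length : Int) max_segments)
    splitLoopB L max_segments words [] []

-- ===== PRECONDITION & SPEC =====
def Spec_split_prompt (prompt : String) (max_segments : Int) (out : List String) : Prop := out = split_prompt_alt prompt max_segments
instance (prompt : String) (max_segments : Int) (out : List String) : Decidable (Spec_split_prompt prompt max_segments out) := by unfold Spec_split_prompt; infer_instance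

-- ===== CLAIM (what is proved, stated in full; the proofs are below) =====
def Claim_equal_split_prompt : Prop := ∀ (prompt : String) (max_segments : Int), Dom_split_prompt prompt max_segments → Spec_split_prompt prompt max_segments (split_prompt prompt max_segments)

-- ===== LEMMAS AND PROOFS =====

-- the j-th fixed-size chunk and the tail segment starting at chunk j
def chunkJ (words : List String) (l j : Nat) : String :=
  PySem.Str.join " " ((words.drop (j * l)).take l)
def tailJ (words : List String) (l j : Nat) : String :=
  PySem.Str.join " " (words.drop (j * l))

lemma split0_go_ne_nil (s : List Char) : ∀ (cur : List Char) (acc : List (List Char)),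
    (∀ w ∈ acc, w ≠ []) →
    ∀ w ∈ PySem.Chars.split₀.go s cur acc, w ≠ [] := by
  induction s with
  | nil =>
    intro cur acc hacc w hw
    simp only [PySem.Chars.split₀.go] at hw
    split at hw
    · exact hacc w (List.mem_reverse.mp hw)
    · next hne =>
      rcases List.mem_cons.mp (List.mem_reverse.mp hw) with h | h
      · subst h
        simp [List.isEmpty_iff] at hne ⊢
        exact fun hh => hne (by simp [hh])
      · exact hacc w h
  | cons c rest ih =>
    intro cur acc hacc w hw
    simp only [PySem.Chars.split₀.go] at hw
    split at hw
    · split at hw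
      · exact ih [] acc hacc w hw
      · next hne =>
        refine ih [] _ ?_ w hw
        intro v hv
        rcases List.mem_cons.mp hv with h | h
        · subst h
          simp [List.isEmpty_iff] at hne ⊢
          exact fun hh => hne (by simp [hh])
        · exact hacc v h
    · exact ih (c :: cur) acc hacc w hw

lemma words_ne_empty (s : String) : ∀ w ∈ PySem.Str.split₀ s, w ≠ "" := by
  intro w hw
  simp only [PySem.Str.split₀, List.mem_map] at hw
  obtain ⟨cs, hcs, rfl⟩ := hw
  have h := split0_go_ne_nil s.toList [] [] (by simp) cs hcs
  intro he
  apply h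
  have := congrArg String.toList he
  simpa using this

lemma chars_join_append (sep : List Char) (B : List (List Char)) (hB : B ≠ []) :
    ∀ (A : List (List Char)), A ≠ [] →
    PySem.Chars.join sep (A ++ B) = PySem.Chars.join sep A ++ sep ++ PySem.Chars.join sep B := by
  intro A
  induction A with
  | nil => simp
  | cons a A ih =>
    intro _
    cases A with
    | nil =>
      cases B with
      | nil => exact absurd rfl hB
      | cons b B => simp [PySem.Chars.join_cons_cons, PySem.Chars.join_singleton, List.append_assoc]
    | cons a' A' =>
      have := ih (by simp)
      simp only [List.cons_append] at this ⊢
      rw [PySem.Chars.join_cons_cons, PySem.Chars.join_cons_cons, this]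
      simp [List.append_assoc]

lemma str_join_append (xs ys : List String) (hx : xs ≠ []) (hy : ys ≠ []) :
    PySem.Str.join " " (xs ++ ys) = PySem.Str.join " " [PySem.Str.join " " xs, PySem.Str.join " " ys] := by
  simp only [PySem.Str.join, List.map_append, List.map_cons, List.map_nil, String.toList_ofList]
  rw [chars_join_append _ _ (by simpa using hy) _ (by simpa using hx)]
  rw [PySem.Chars.join_cons_cons, PySem.Chars.join_singleton]

lemma str_join_eq_empty_iff (ys : List String) (h : ∀ w ∈ ys, w ≠ "") :
    PySem.Str.join " " ys = "" ↔ ys = [] := by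
  constructor
  · intro he
    cases ys with
    | nil => rfl
    | cons y ys =>
      exfalso
      have hy : y.toList ≠ [] := by
        intro hh
        exact h y (by simp) (by have := congrArg String.ofList hh; simpa using this)
      have := congrArg String.toList he
      simp only [PySem.Str.join, String.toList_ofList, List.map_cons] at this
      cases ys with
      | nil =>
        rw [List.map_nil, PySem.Chars.join_singleton] at this
        simp at this; exact h y (by simp) this
      | cons z zs =>
        rw [List.map_cons, PySem.Chars.join_cons_cons] at this
        simp at this
  · intro he; subst he; simp [PySem.Str.join, PySem.Chars.join_nil]

lemma ceil_bounds (n l : Nat) (hl : 1 ≤ l) (hn : 1 ≤ n) :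
    ((n + l - 1) / l - 1) * l < n ∧ n ≤ ((n + l - 1) / l) * l ∧ 1 ≤ (n + l - 1) / l := by
  have hdm := Nat.div_add_mod (n + l - 1) l
  have hr : (n + l - 1) % l < l := Nat.mod_lt _ (by omega)
  set q := (n + l - 1) / l with hq
  have hq1 : 1 ≤ q := by
    rcases Nat.eq_zero_or_pos q with h0 | h1
    · rw [h0, Nat.mul_zero] at hdm; omega
    · exact h1
  have h1 : q * l = l * q := Nat.mul_comm _ _
  have h2 : (q - 1) * l = l * q - l := by
    cases q with
    | zero => omega
    | succ q' => simp [Nat.mul_comm, Nat.mul_succ]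
  refine ⟨by omega, by omega, hq1⟩

-- chunk j equals the tail segment when the words end within chunk j
lemma chunk_eq_tail (words : List String) (l j : Nat) (h : words.length ≤ j * l + l) :
    chunkJ words l j = tailJ words l j := by
  unfold chunkJ tailJ
  rw [List.take_of_length_le (by simp; omega)]

lemma loopA_eq (words : List String) (m : Int) (l c kn : Nat)
    (hw : ∀ w ∈ words, w ≠ "")
    (hl : 1 ≤ l)
    (hc : c = (words.length + l - 1) / l)
    (hkn : kn = min c (m - 1).toNat)
    (hm : 2 ≤ m)
    (hn : 1 ≤ words.length) :
    ∀ (d j : Nat) (segs : List String), c - j = d → segs.length = j → j < kn →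
      splitLoopA words (l : Int) m ((List.range d).map (fun t => (((j + t) * l : Nat) : Int))) segs
        = segs ++ (List.range (kn - 1 - j)).map (fun t => chunkJ words l (j + t)) ++ [tailJ words l (kn - 1)] := by
  intro d
  induction d with
  | zero =>
    intro j segs hd hlen hj
    have hknc : kn ≤ c := by rw [hkn]; exact Nat.min_le_left _ _
    omega
  | succ d ih =>
    intro j segs hd hlen hj
    have hknc : kn ≤ c := by rw [hkn]; exact Nat.min_le_left _ _
    have hjc : j < c := by omega
    have hcb := ceil_bounds words.length l hl hn
    rw [← hc] at hcb
    have hjl : j * l < words.length := by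
      have h1 : j * l ≤ (c - 1) * l := Nat.mul_le_mul_right _ (by omega)
      omega
    rw [List.range_succ_eq_map, List.map_cons, List.map_map]
    simp only [splitLoopA]
    simp only [Nat.add_zero]
    rw [PySem.List.slice_natCast_add]
    rw [show List.map ((fun t => (((j + t) * l : Nat) : Int)) ∘ Nat.succ) (List.range d)
          = (List.range d).map (fun t => ((((j + 1) + t) * l : Nat) : Int)) from
        List.map_congr_left (fun t _ => by
          simp only [Function.comp_apply, Nat.succ_eq_add_one]
          rw [show j + (t + 1) = (j + 1) + t from by omega])]
    have hlen' : (segs ++ [PySem.Str.join " " ((words.drop (j * l)).take l)]).length = j + 1 := by simp [hlen]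
    show (if (((segs ++ [PySem.Str.join " " ((words.drop (j * l)).take l)]).length : Nat) : Int) = m - 1 then _ else _) = _
    rw [hlen']
    by_cases hbr : ((j : Int) + 1 = m - 1)
    · rw [if_pos (by push_cast; omega)]
      have hknj : kn = j + 1 := by omega
      rw [show ((j * l : Nat) : Int) + (l : Int) = (((j * l + l : Nat)) : Int) from by push_cast; ring,
          PySem.List.slice_from_natCast]
      by_cases hrem : PySem.Str.join " " (words.drop (j * l + l)) = ""
      · rw [if_neg (by simpa using hrem)]
        have hdrop : words.drop (j * l + l) = [] :=
          (str_join_eq_empty_iff _ (fun w hw' => hw w (List.mem_of_mem_drop hw'))).mp hrem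
        have hle : words.length ≤ j * l + l := by
          have := List.drop_eq_nil_iff.mp hdrop
          omega
        rw [show kn - 1 - j = 0 from by omega, show kn - 1 = j from by omega]
        have hce := chunk_eq_tail words l j hle
        unfold chunkJ tailJ at hce
        simp [hce, tailJ]
      · rw [if_pos (by simpa using hrem)]
        rw [show kn - 1 - j = 0 from by omega, show kn - 1 = j from by omega]
        have hsp : words.drop (j * l) = (words.drop (j * l)).take l ++ words.drop (j * l + l) := by
          conv_lhs => rw [← List.take_append_drop l (words.drop (j * l))]
          rw [List.drop_drop, Nat.add_comm]
        have htk : (words.drop (j * l)).take l ≠ [] := by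
          intro h0
          have := congrArg List.length h0
          simp at this
          omega
        have hdr : words.drop (j * l + l) ≠ [] := by
          intro h0
          exact hrem (by rw [h0]; simp [PySem.Str.join, PySem.Chars.join_nil])
        have := str_join_append _ _ htk hdr
        rw [← hsp] at this
        unfold chunkJ tailJ
        rw [this]
        simp
    · rw [if_neg (by push_cast; omega)]
      cases d with
      | zero =>
        have hc1 : c = j + 1 := by omega
        have hknj : kn = j + 1 := by omega
        simp only [List.range_zero, List.map_nil, splitLoopA]
        have hle : words.length ≤ j * l + l := by
          have h2 : c * l ≤ (j + 1) * l := Nat.mul_le_mul_right _ (by omega)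
          have h3 : (j + 1) * l = j * l + l := by rw [Nat.succ_mul]
          omega
        rw [show kn - 1 - j = 0 from by omega, show kn - 1 = j from by omega]
        have hce := chunk_eq_tail words l j hle
        unfold chunkJ tailJ at hce
        simp [hce, tailJ, chunkJ]
      | succ d' =>
        have hmn : ((m - 1).toNat : Int) = m - 1 := by omega
        have hjkn : j + 1 < kn := by omega
        rw [ih (j + 1) (segs ++ [PySem.Str.join " " ((words.drop (j * l)).take l)]) (by omega) hlen' hjkn]
        rw [show kn - 1 - j = (kn - 1 - (j + 1)) + 1 from by omega]
        rw [List.range_succ_eq_map, List.map_cons, List.map_map]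
        rw [show List.map ((fun t => chunkJ words l (j + t)) ∘ Nat.succ) (List.range (kn - 1 - (j + 1)))
              = (List.range (kn - 1 - (j + 1))).map (fun t => chunkJ words l ((j + 1) + t)) from
            List.map_congr_left (fun t _ => by
              simp only [Function.comp_apply, Nat.succ_eq_add_one]
              rw [show j + (t + 1) = (j + 1) + t from by omega])]
        simp [chunkJ]

-- B-side invariant: after p words, min(p/l, m-2) groups are flushed and cur holds the rest
lemma loopB_eq (words : List String) (m : Int) (l c kn M2 : Nat)
    (hl : 1 ≤ l)
    (hc : c = (words.length + l - 1) / l)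
    (hM2 : (M2 : Int) = m - 2)
    (hkn : kn = min c (M2 + 1))
    (hn : 1 ≤ words.length) :
    ∀ (d p : Nat), words.length = p + d →
      splitLoopB (l : Int) m (words.drop p)
        ((List.range (min (p / l) M2)).map (fun t => chunkJ words l t))
        ((words.drop ((min (p / l) M2) * l)).take (p - (min (p / l) M2) * l))
      = (List.range (kn - 1)).map (fun t => chunkJ words l t) ++ [tailJ words l (kn - 1)] := by
  intro d
  induction d with
  | zero =>
    intro p hp
    have hpn : words.length = p := by omega
    set f := min (p / l) M2 with hf
    have hfM2 : f ≤ M2 := Nat.min_le_right _ _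
    have hfl_le : f * l ≤ p := by
      have h1 : f ≤ p / l := Nat.min_le_left _ _
      have h2 : (p / l) * l ≤ p := Nat.div_mul_le_self p l
      calc f * l ≤ (p / l) * l := Nat.mul_le_mul_right _ h1
        _ ≤ p := h2
    rw [List.drop_of_length_le (by omega)]
    simp only [splitLoopB]
    have hcurlen : ((words.drop (f * l)).take (p - f * l)).length = p - f * l := by
      simp; omega
    by_cases hfull : p = f * l
    · have hcur : (words.drop (f * l)).take (p - f * l) = [] := by
        rw [show p - f * l = 0 from by omega]; simp
      rw [if_neg (by simp [hcur])]
      -- exact multiple: p = f*l, so c = f, kn = f, and tail (f-1) = chunk (f-1)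
      have hf1 : 1 ≤ f := by
        rcases Nat.eq_zero_or_pos f with h0 | h1
        · rw [h0] at hfull; omega
        · exact h1
      have hcf : c = f := by
        rw [hc, hpn, hfull, show f * l + l - 1 = (l - 1) + f * l from by omega,
          Nat.add_mul_div_right _ _ (by omega : 0 < l), Nat.div_eq_of_lt (by omega)]
        omega
      have hknf : kn = f := by rw [hkn, hcf]; omega
      rw [hknf]
      rw [show List.range f = List.range (f - 1 + 1) from by rw [Nat.sub_add_cancel hf1],
        List.range_succ, List.map_append, List.map_singleton]
      rw [chunk_eq_tail words l (f - 1) (by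
        have h2 : (f - 1 + 1) * l = f * l := by rw [Nat.sub_add_cancel hf1]
        have h3 : (f - 1 + 1) * l = (f - 1) * l + l := by ring
        omega)]
    · have hplt : f * l < p := by omega
      have hcur : (words.drop (f * l)).take (p - f * l) = words.drop (f * l) := by
        apply List.take_of_length_le; simp; omega
      have hcurne : (words.drop (f * l)).take (p - f * l) ≠ [] := by
        intro h0
        have := congrArg List.length h0
        rw [hcurlen] at this
        simp at this; omega
      rw [if_pos hcurne, hcur]
      -- leftover words: kn = f + 1 and the final accumulator is tail f
      have hknf : kn = f + 1 := by
        rcases Nat.lt_or_ge (p / l) M2 with hlt | hge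
        · have hfp : f = p / l := by rw [hf]; omega
          have hcm : l * (p / l) = (p / l) * l := Nat.mul_comm _ _
          have hplt' : (p / l) * l < p := by rw [← hfp]; exact hplt
          have hmod : p % l ≠ 0 := by
            intro h0
            have := Nat.div_add_mod p l
            rw [h0] at this
            omega
          have hcf : c = f + 1 := by
            have hdm := Nat.div_add_mod p l
            rw [hc, hpn, show p + l - 1 = (p % l - 1) + (p / l + 1) * l from by
              have : (p / l + 1) * l = (p / l) * l + l := by ring
              omega,
              Nat.add_mul_div_right _ _ (by omega : 0 < l),
              Nat.div_eq_of_lt (by have := Nat.mod_lt p (show 0 < l by omega); omega)]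
            omega
          rw [hkn, hcf, hfp]; omega
        · have hfp : f = M2 := by rw [hf]; omega
          have hcge : f + 1 ≤ c := by
            have h1 : (f + 1) * l ≤ p + l - 1 := by
              have : (f + 1) * l = f * l + l := by ring
              omega
            have := Nat.div_le_div_right (c := l) h1
            rw [Nat.mul_div_cancel _ (by omega : 0 < l)] at this
            rw [hc, hpn]; omega
          rw [hkn, hfp]; omega
      rw [hknf]
      simp [tailJ]
  | succ d ih =>
    intro p hp
    have hplt : p < words.length := by omega
    set f := min (p / l) M2 with hf
    have hfl_le : f * l ≤ p := by
      have h1 : f ≤ p / l := Nat.min_le_left _ _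
      have h2 : (p / l) * l ≤ p := Nat.div_mul_le_self p l
      calc f * l ≤ (p / l) * l := Nat.mul_le_mul_right _ h1
        _ ≤ p := h2
    rw [List.drop_eq_getElem_cons hplt]
    simp only [splitLoopB]
    have hcurlen : ((words.drop (f * l)).take (p - f * l)).length = p - f * l := by
      simp; omega
    have hcur' : (words.drop (f * l)).take (p - f * l) ++ [words[p]]
        = (words.drop (f * l)).take (p + 1 - f * l) := by
      rw [show p + 1 - f * l = (p - f * l) + 1 from by omega, List.take_add_one]
      congr 1
      rw [List.getElem?_drop, show f * l + (p - f * l) = p from by omega,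
        List.getElem?_eq_getElem hplt]
      rfl
    have hlensegs : ((List.range f).map (fun t => chunkJ words l t)).length = f := by simp
    by_cases hflush : (p + 1 - f * l = l ∧ f < M2)
    · have hcond : (((((words.drop (f * l)).take (p - f * l) ++ [words[p]]).length : Nat) : Int) = (l : Int)
          ∧ ((((List.range f).map (fun t => chunkJ words l t)).length : Nat) : Int) < m - 2) := by
        constructor
        · rw [hcur']; simp only [List.length_take, List.length_drop]
          have : min (p + 1 - f * l) (words.length - f * l) = l := by omega
          rw [this]
        · rw [hlensegs, ← hM2]
          exact_mod_cast hflush.2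
      rw [if_pos hcond]
      have hpl1 : (p + 1) / l = f + 1 := by
        have h2 : p + 1 = (f + 1) * l := by
          have : (f + 1) * l = f * l + l := by ring
          omega
        rw [h2, Nat.mul_div_cancel _ (by omega)]
      have hmin1 : min ((p + 1) / l) M2 = f + 1 := by rw [hpl1]; omega
      have hih := ih (p + 1) (by omega)
      rw [hmin1] at hih
      rw [← hih]
      congr 1
      · rw [List.range_succ, List.map_append, List.map_singleton, hcur']
        congr 2
        unfold chunkJ
        rw [show p + 1 - f * l = l from hflush.1]
      · rw [show p + 1 - (f + 1) * l = 0 from by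
          have : (f + 1) * l = f * l + l := by ring
          omega]
        simp
    · have hcond : ¬ (((((words.drop (f * l)).take (p - f * l) ++ [words[p]]).length : Nat) : Int) = (l : Int)
          ∧ ((((List.range f).map (fun t => chunkJ words l t)).length : Nat) : Int) < m - 2) := by
        intro hcd
        apply hflush
        constructor
        · have h1 := hcd.1
          rw [hcur'] at h1
          simp only [List.length_take, List.length_drop] at h1
          have hmm : min (p + 1 - f * l) (words.length - f * l) = p + 1 - f * l := by omega
          rw [hmm] at h1
          exact_mod_cast h1
        · have h2 := hcd.2
          rw [hlensegs, ← hM2] at h2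
          exact_mod_cast h2
      rw [if_neg hcond]
      have hminsame : min ((p + 1) / l) M2 = f := by
        rcases Nat.lt_or_ge (p / l) M2 with hlt | hge
        · have hfp : f = p / l := by rw [hf]; omega
          have hne : p + 1 - f * l ≠ l := fun h => hflush ⟨h, by omega⟩
          have hmodlt : p - f * l < l := by
            have hml := Nat.mod_lt p (show 0 < l by omega)
            have hmod : p - f * l = p % l := by
              rw [hfp]
              have hcm : l * (p / l) = (p / l) * l := Nat.mul_comm _ _
              have := Nat.div_add_mod p l
              omega
            omega
          have hpl1 : (p + 1) / l = f := by
            apply Nat.div_eq_of_lt_le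
            · omega
            · have : (f + 1) * l = f * l + l := by ring
              omega
          rw [hpl1]; omega
        · have hfp : f = M2 := by rw [hf]; omega
          have hge1 : M2 ≤ (p + 1) / l := le_trans hge (Nat.div_le_div_right (by omega))
          rw [hfp]; omega
      have hih := ih (p + 1) (by omega)
      rw [hminsame] at hih
      rw [← hih, hcur']

-- ===== VERDICT (by name: the statement is the Claim_ definition above) =====
theorem split_prompt_spec : Claim_equal_split_prompt := by
  intro prompt m _
  show split_prompt prompt m = split_prompt_alt prompt m
  simp only [split_prompt, split_prompt_alt]
  by_cases hg : m ≤ 1 ∨ (((PySem.Str.split₀ prompt).length : Nat) : Int) ≤ 1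
  · simp only [if_pos hg]
  · simp only [if_neg hg]
    set words := PySem.Str.split₀ prompt with hwords
    set n := words.length with hn
    have hm : 2 ≤ m := by omega
    have hn2 : 2 ≤ n := by omega
    have hw := words_ne_empty prompt
    have hq0 : 0 ≤ PySem.Int.floordiv (n : Int) m := by
      rw [PySem.Int.floordiv_eq_ediv_of_pos (by omega)]
      exact Int.ediv_nonneg (by omega) (by omega)
    obtain ⟨l, hL, hl1⟩ : ∃ l : Nat, (l : Int) = max 1 (PySem.Int.floordiv (n : Int) m) ∧ 1 ≤ l :=
      ⟨(max 1 (PySem.Int.floordiv (n : Int) m)).toNat, by omega, by omega⟩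
    rw [← hL]
    set c := (n + l - 1) / l with hcdef
    have hcb := ceil_bounds n l hl1 (by omega)
    rw [← hcdef] at hcb
    -- A side → canonical chunks
    rw [PySem.List.pyRange_of_pos _ _ (by omega : (0:ℤ) < (l : Int))]
    rw [if_pos (by omega : (0:ℤ) < (n : Int))]
    rw [show (((n : Int) - 0 + l - 1) / l).toNat = c from by
      rw [show ((n : Int) - 0 + l - 1) = ((n + l - 1 : Nat) : Int) from by omega]
      norm_cast]
    rw [show (List.range c).map (fun k : Nat => (0:ℤ) + (l : Int) * (k:ℤ))
          = (List.range c).map (fun t => (((0 + t) * l : Nat) : Int)) from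
        List.map_congr_left (fun t _ => by push_cast; ring)]
    rw [loopA_eq words m l c (min c (m-1).toNat) hw hl1 hcdef rfl hm (by omega) c 0 [] (by omega) rfl (by omega)]
    -- B side → canonical chunks
    obtain ⟨M2, hM2⟩ : ∃ M2 : Nat, (M2 : Int) = m - 2 := ⟨(m - 2).toNat, by omega⟩
    have hB := loopB_eq words m l c (min c (M2 + 1)) M2 hl1 hcdef hM2 rfl (by omega) n 0 (by omega)
    rw [Nat.zero_div, Nat.min_eq_left (Nat.zero_le _)] at hB
    simp only [Nat.zero_mul, Nat.sub_self, List.range_zero, List.map_nil,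
      List.drop_zero, List.take_zero] at hB
    rw [hB]
    have hknkn : min c (m - 1).toNat = min c (M2 + 1) := by
      congr 1
      omega
    rw [hknkn]
    simp [tailJ]
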